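-- pv_equiv track=rewrite | github.com/YashVardhan-21/fracto-voice-agent | backend/app/database.py | _make_async_url
-- ===== SOURCE A (Python) =====
-- def _make_async_url(url: str) -> str:
--     """Normalise DB URLs to async drivers for SQLAlchemy async engine."""
--     if url.startswith("postgresql+asyncpg://"):
--         return url
--     if url.startswith("postgresql+psycopg2://"):
--         return "postgresql+asyncpg://" + url[len("postgresql+psycopg2://"):]
--     for prefix in ("postgresql://", "postgres://"):
--         if url.startswith(prefix):
--             return "postgresql+asyncpg://" + url[len(prefix):]
--     return url
-- ===== SOURCE B (Python) =====
-- _SCHEME_MAP = {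
--     "postgresql": "postgresql+asyncpg",
--     "postgres": "postgresql+asyncpg",
--     "postgresql+psycopg2": "postgresql+asyncpg",
--     "postgresql+asyncpg": "postgresql+asyncpg",
-- }
--
--
-- def _make_async_url(url: str) -> str:
--     """Normalise DB URLs to async drivers for SQLAlchemy async engine."""
--     scheme, sep, rest = url.partition("://")
--     if not sep:
--         return url
--     mapped = _SCHEME_MAP.get(scheme)
--     if mapped is None:
--         return url
--     return mapped + "://" + rest
-- ===== Notes on version B (the rewrite author's own statement) =====
-- stated objective: alternative
-- what changed: B parses the URL structurally: it splits once at the first '://' into scheme and remainder and looks the scheme up in a table, instead of A's ordered chain of four startswith probes with per-prefix slicing.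
import Mathlib
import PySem

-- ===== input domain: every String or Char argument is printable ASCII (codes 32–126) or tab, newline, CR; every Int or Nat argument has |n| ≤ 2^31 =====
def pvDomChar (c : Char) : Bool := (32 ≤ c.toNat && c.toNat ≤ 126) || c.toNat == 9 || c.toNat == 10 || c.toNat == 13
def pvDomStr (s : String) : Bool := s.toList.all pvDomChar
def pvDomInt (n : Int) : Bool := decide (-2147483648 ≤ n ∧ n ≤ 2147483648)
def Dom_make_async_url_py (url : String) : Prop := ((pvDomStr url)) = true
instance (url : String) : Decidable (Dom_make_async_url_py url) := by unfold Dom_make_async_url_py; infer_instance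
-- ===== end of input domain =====

-- B replaces A's ordered chain of startswith probes by one split at the first "://" plus a
-- scheme-table lookup (objective: alternative decomposition, same cost).

-- ===== PORT A =====
-- the 'for prefix in (...)' loop with early return, as recursion over the tuple
def pvALoop (url : String) : List String → Option String
  | [] => none
  | p :: ps =>
    if PySem.Str.startswith url p then
      some ("postgresql+asyncpg://" ++ PySem.Str.slice url (some (PySem.Str.len p)) none)
    else pvALoop url ps

def make_async_url_py (url : String) : String :=
  if PySem.Str.startswith url "postgresql+asyncpg://" then url
  else if PySem.Str.startswith url "postgresql+psycopg2://" then
    "postgresql+asyncpg://" ++ PySem.Str.slice url (some (PySem.Str.len "postgresql+psycopg2://")) none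
  else
    match pvALoop url ["postgresql://", "postgres://"] with
    | some r => r
    | none => url

-- ===== PORT B =====
-- url.partition("://") : some (before, after) at the FIRST occurrence, none if absent
-- (hand port of str.partition, exact: scans left to right for the 3-char separator)
def pvPartition3 : List Char → Option (List Char × List Char)
  | [] => none
  | c :: t =>
    if (':' :: '/' :: '/' :: []).isPrefixOf (c :: t) then some ([], t.drop 2)
    else (pvPartition3 t).map (fun p => (c :: p.1, p.2))

def pvSchemeMap : PySem.Dict String String :=
  PySem.Dict.ofList
    [("postgresql", "postgresql+asyncpg"), ("postgres", "postgresql+asyncpg"),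
     ("postgresql+psycopg2", "postgresql+asyncpg"), ("postgresql+asyncpg", "postgresql+asyncpg")]

def make_async_url_py_alt (url : String) : String :=
  match pvPartition3 url.toList with
  | none => url
  | some (scheme, rest) =>
    match PySem.Dict.get? pvSchemeMap (String.ofList scheme) with
    | none => url
    | some mapped => mapped ++ "://" ++ String.ofList rest

-- ===== PRECONDITION & SPEC =====
def Spec_make_async_url_py (url : String) (out : String) : Prop := out = make_async_url_py_alt url
instance (url : String) (out : String) : Decidable (Spec_make_async_url_py url out) := by unfold Spec_make_async_url_py; infer_instance

-- ===== CLAIM (what is proved, stated in full; the proofs are below) =====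
def Claim_equal_make_async_url_py : Prop := ∀ (url : String), Dom_make_async_url_py url → Spec_make_async_url_py url (make_async_url_py url)

-- ===== LEMMAS AND PROOFS =====

theorem str_eq_of_toList {a b : String} (h : a.toList = b.toList) : a = b := by
  have := congrArg String.ofList h
  simpa [String.ofList_toList] using this

-- partition reconstructs its input
theorem part_recon : ∀ (l a b : List Char), pvPartition3 l = some (a, b) →
    l = a ++ ':' :: '/' :: '/' :: b := by
  intro l
  induction l with
  | nil => intro a b h; simp [pvPartition3] at h
  | cons c t ih =>
    intro a b h
    by_cases hp : (':' :: '/' :: '/' :: []).isPrefixOf (c :: t) = true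
    · simp [pvPartition3, hp] at h
      rw [List.isPrefixOf_iff_prefix] at hp
      obtain ⟨s, hs⟩ := hp
      obtain ⟨ha, hb⟩ := h
      subst ha
      simp at hs
      obtain ⟨h1, h2⟩ := hs
      subst h1
      subst hb
      simp [← h2]
    · simp [pvPartition3, hp] at h
      obtain ⟨a1, hp2, ha⟩ := h
      subst ha
      simpa using ih a1 b hp2

-- a "://" right after a colon-free block is the FIRST "://": partition finds exactly it
theorem part_of : ∀ (a b : List Char), ':' ∉ a →
    pvPartition3 (a ++ ':' :: '/' :: '/' :: b) = some (a, b) := by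
  intro a
  induction a with
  | nil => intro b _; simp [pvPartition3, List.isPrefixOf]
  | cons c a ih =>
    intro b h
    have hc : c ≠ ':' := fun e => h (by simp [e])
    have hif : ¬ ((':' :: '/' :: '/' :: []).isPrefixOf (c :: (a ++ ':' :: '/' :: '/' :: b)) = true) := by
      simp [List.isPrefixOf, Ne.symm hc]
    simp only [List.cons_append, pvPartition3, if_neg hif]
    rw [ih b (fun m => h (by simp [m]))]
    rfl

theorem items_schemeMap : pvSchemeMap.items =
    [("postgresql", "postgresql+asyncpg"), ("postgres", "postgresql+asyncpg"),
     ("postgresql+psycopg2", "postgresql+asyncpg"), ("postgresql+asyncpg", "postgresql+asyncpg")] := by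
  decide

-- a successful lookup pins the key to one of the four schemes
theorem get?_schemeMap {k v : String} (h : PySem.Dict.get? pvSchemeMap k = some v) :
    k = "postgresql" ∨ k = "postgres" ∨ k = "postgresql+psycopg2" ∨ k = "postgresql+asyncpg" := by
  rw [PySem.Dict.get?, items_schemeMap] at h
  rw [List.find?_cons, List.find?_cons, List.find?_cons, List.find?_cons] at h
  cases hb1 : (("postgresql" : String) == k) with
  | true => exact Or.inl (eq_comm.mp (eq_of_beq hb1))
  | false =>
  cases hb2 : (("postgres" : String) == k) with
  | true => exact Or.inr (Or.inl (eq_comm.mp (eq_of_beq hb2)))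
  | false =>
  cases hb3 : (("postgresql+psycopg2" : String) == k) with
  | true => exact Or.inr (Or.inr (Or.inl (eq_comm.mp (eq_of_beq hb3))))
  | false =>
  cases hb4 : (("postgresql+asyncpg" : String) == k) with
  | true => exact Or.inr (Or.inr (Or.inr (eq_comm.mp (eq_of_beq hb4))))
  | false =>
    rw [hb1, hb2, hb3, hb4] at h
    simp at h

-- 'url starts with <scheme>://' gives the decomposition of url.toList
theorem toList_decomp {url : String} {p s : String}
    (hs : PySem.Str.startswith url p = true)
    (hd : p.toList = s.toList ++ ':' :: '/' :: '/' :: []) :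
    ∃ t, url.toList = s.toList ++ ':' :: '/' :: '/' :: t := by
  rw [PySem.Str.startswith_eq] at hs
  have hp : p.toList <+: url.toList := List.isPrefixOf_iff_prefix.mp hs
  obtain ⟨t, ht⟩ := hp
  exact ⟨t, by rw [← ht, hd]; simp⟩

-- A = B, case by case on A's probes
theorem make_async_url_py_eq (url : String) : make_async_url_py url = make_async_url_py_alt url := by
  by_cases h1 : PySem.Str.startswith url "postgresql+asyncpg://" = true
  · -- already asyncpg: both return the url (B rebuilds it verbatim)
    obtain ⟨t, hl⟩ := toList_decomp (s := "postgresql+asyncpg") h1 (by decide)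
    rw [make_async_url_py, if_pos h1, make_async_url_py_alt, hl,
      part_of _ t (by decide)]
    simp only [String.ofList_toList]
    have hg : PySem.Dict.get? pvSchemeMap "postgresql+asyncpg" = some "postgresql+asyncpg" := by decide
    rw [hg]
    simp only []
    refine str_eq_of_toList ?_
    rw [hl]
    simp [String.toList_append, String.toList_ofList]
  by_cases h2 : PySem.Str.startswith url "postgresql+psycopg2://" = true
  · obtain ⟨t, hl⟩ := toList_decomp (s := "postgresql+psycopg2") h2 (by decide)
    rw [make_async_url_py, if_neg h1, if_pos h2, make_async_url_py_alt, hl,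
      part_of _ t (by decide)]
    simp only [String.ofList_toList]
    have hg : PySem.Dict.get? pvSchemeMap "postgresql+psycopg2" = some "postgresql+asyncpg" := by decide
    rw [hg]
    simp only []
    refine str_eq_of_toList ?_
    simp only [String.toList_append, PySem.Str.toList_slice, PySem.Chars.slice_eq_listSlice,
      String.toList_ofList]
    rw [PySem.List.slice_from url.toList (by norm_num), hl]
    have : ("postgresql+psycopg2".toList ++ ':' :: '/' :: '/' :: t).drop ((PySem.Str.len "postgresql+psycopg2://").toNat)
        = t := by
      rw [show (PySem.Str.len "postgresql+psycopg2://").toNat = ("postgresql+psycopg2".toList ++ [':', '/', '/']).length from by decide]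
      rw [show ("postgresql+psycopg2".toList ++ ':' :: '/' :: '/' :: t) = ("postgresql+psycopg2".toList ++ [':', '/', '/']) ++ t from by simp]
      exact List.drop_left
    rw [this]
    simp [show ("postgresql+asyncpg://".toList) = "postgresql+asyncpg".toList ++ [':', '/', '/'] from by decide,
      show ("://".toList) = [':', '/', '/'] from by decide]
  by_cases h3 : PySem.Str.startswith url "postgresql://" = true
  · obtain ⟨t, hl⟩ := toList_decomp (s := "postgresql") h3 (by decide)
    rw [make_async_url_py, if_neg h1, if_neg h2, make_async_url_py_alt, hl,
      part_of _ t (by decide)]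
    simp only [String.ofList_toList]
    have hg : PySem.Dict.get? pvSchemeMap "postgresql" = some "postgresql+asyncpg" := by decide
    rw [hg]
    simp only []
    rw [pvALoop, if_pos h3]
    refine str_eq_of_toList ?_
    simp only [String.toList_append, PySem.Str.toList_slice, PySem.Chars.slice_eq_listSlice,
      String.toList_ofList]
    rw [PySem.List.slice_from url.toList (by norm_num), hl]
    have : ("postgresql".toList ++ ':' :: '/' :: '/' :: t).drop ((PySem.Str.len "postgresql://").toNat) = t := by
      rw [show (PySem.Str.len "postgresql://").toNat = ("postgresql".toList ++ [':', '/', '/']).length from by decide]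
      rw [show ("postgresql".toList ++ ':' :: '/' :: '/' :: t) = ("postgresql".toList ++ [':', '/', '/']) ++ t from by simp]
      exact List.drop_left
    rw [this]
    simp [show ("postgresql+asyncpg://".toList) = "postgresql+asyncpg".toList ++ [':', '/', '/'] from by decide,
      show ("://".toList) = [':', '/', '/'] from by decide]
  by_cases h4 : PySem.Str.startswith url "postgres://" = true
  · obtain ⟨t, hl⟩ := toList_decomp (s := "postgres") h4 (by decide)
    rw [make_async_url_py, if_neg h1, if_neg h2, make_async_url_py_alt, hl,
      part_of _ t (by decide)]
    simp only [String.ofList_toList]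
    have hg : PySem.Dict.get? pvSchemeMap "postgres" = some "postgresql+asyncpg" := by decide
    rw [hg]
    simp only []
    rw [pvALoop, if_neg h3, pvALoop, if_pos h4]
    refine str_eq_of_toList ?_
    simp only [String.toList_append, PySem.Str.toList_slice, PySem.Chars.slice_eq_listSlice,
      String.toList_ofList]
    rw [PySem.List.slice_from url.toList (by norm_num), hl]
    have : ("postgres".toList ++ ':' :: '/' :: '/' :: t).drop ((PySem.Str.len "postgres://").toNat) = t := by
      rw [show (PySem.Str.len "postgres://").toNat = ("postgres".toList ++ [':', '/', '/']).length from by decide]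
      rw [show ("postgres".toList ++ ':' :: '/' :: '/' :: t) = ("postgres".toList ++ [':', '/', '/']) ++ t from by simp]
      exact List.drop_left
    rw [this]
    simp [show ("postgresql+asyncpg://".toList) = "postgresql+asyncpg".toList ++ [':', '/', '/'] from by decide,
      show ("://".toList) = [':', '/', '/'] from by decide]
  · -- fall-through: A returns url; B's lookup must fail (or there is no "://")
    rw [make_async_url_py, if_neg h1, if_neg h2, pvALoop, if_neg h3, pvALoop, if_neg h4, pvALoop]
    rw [make_async_url_py_alt]
    cases hp : pvPartition3 url.toList with
    | none => rfl
    | some ab =>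
      obtain ⟨a, b⟩ := ab
      have hl := part_recon url.toList a b hp
      cases hg : PySem.Dict.get? pvSchemeMap (String.ofList a) with
      | none => simp only [hg]
      | some v =>
        exfalso
        have hstart : ∀ (s : String), s.toList = a → ∀ (p : String), p.toList = a ++ [':', '/', '/'] →
            PySem.Str.startswith url p = true := by
          intro s hsa p hpl
          rw [PySem.Str.startswith_eq, PySem.Chars.startswith, List.isPrefixOf_iff_prefix, hpl, hl]
          exact ⟨b, by simp⟩
        rcases get?_schemeMap hg with hk | hk | hk | hk
        · have ha : "postgresql".toList = a := by rw [← hk, String.toList_ofList]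
          exact h3 (hstart _ ha "postgresql://" (by rw [← ha]; decide))
        · have ha : "postgres".toList = a := by rw [← hk, String.toList_ofList]
          exact h4 (hstart _ ha "postgres://" (by rw [← ha]; decide))
        · have ha : "postgresql+psycopg2".toList = a := by rw [← hk, String.toList_ofList]
          exact h2 (hstart _ ha "postgresql+psycopg2://" (by rw [← ha]; decide))
        · have ha : "postgresql+asyncpg".toList = a := by rw [← hk, String.toList_ofList]
          exact h1 (hstart _ ha "postgresql+asyncpg://" (by rw [← ha]; decide))

-- ===== VERDICT (by name: the statement is the Claim_ definition above) =====
theorem make_async_url_py_spec : Claim_equal_make_async_url_py := by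
  intro url _
  exact make_async_url_py_eq url
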